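-- pv_equiv track=rewrite | github.com/alperbahcekapili/TwitterCrawler | pages/Visualization.py | count_occurances
-- ===== SOURCE A (Python) =====
-- def count_occurances(text, names):
--     counts = {}
--     for label in list(names.keys()):
--         counts[label] = 0
--         for name in names[label]:
--             count = 1 if name in text else 0
--             counts[label] += count
--     return counts
-- ===== SOURCE B (Python) =====
-- def count_occurances(text, names):
--     # Substring-index strategy: enumerate every substring of the text whose length
--     # is the length of some name, then tally each label by membership in that index.
--     lengths = {len(n) for lst in names.values() for n in lst}
--     grams = {text[i:i + l] for l in lengths for i in range(len(text) + 1)}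
--     return {label: sum(n in grams for n in lst) for label, lst in names.items()}
-- ===== Notes on version B (the rewrite author's own statement) =====
-- stated objective: faster
-- what changed: B builds a substring index of the text (every substring whose length is the length of some name) once and tallies each label by set lookups, instead of A's separate 'name in text' scan for every (label, name) pair.
import Mathlib
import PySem

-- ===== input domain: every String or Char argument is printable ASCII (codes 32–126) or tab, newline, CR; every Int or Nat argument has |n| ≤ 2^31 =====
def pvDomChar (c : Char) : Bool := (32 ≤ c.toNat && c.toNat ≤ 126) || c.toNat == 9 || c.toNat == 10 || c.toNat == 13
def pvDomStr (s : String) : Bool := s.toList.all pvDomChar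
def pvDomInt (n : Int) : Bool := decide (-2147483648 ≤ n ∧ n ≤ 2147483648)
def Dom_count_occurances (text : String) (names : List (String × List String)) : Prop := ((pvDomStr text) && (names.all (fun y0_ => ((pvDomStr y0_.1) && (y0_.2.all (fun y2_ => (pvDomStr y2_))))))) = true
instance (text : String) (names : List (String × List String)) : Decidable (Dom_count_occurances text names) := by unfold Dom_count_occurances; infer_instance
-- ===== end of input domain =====

-- B replaces A's per-(label,name) substring searches by a substring index of the text:
-- it collects every substring of the text whose length is the length of some name, then
-- tallies each label by set lookups in that index (different algorithm).


-- ===== PORT A =====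
def count_occurances (text : String) (names : List (String × List String)) : List (String × Int) :=
  let d := PySem.Dict.ofList names
  let counts := d.keys.foldl (fun counts label =>
      let counts := counts.insert label 0
      (d.getD label []).foldl (fun counts name =>
          let count : Int := if PySem.Str.isIn name text then 1 else 0
          counts.insert label (counts.getD label 0 + count)) counts)
    (PySem.Dict.empty)
  counts.items

-- ===== PORT B =====
def count_occurances_alt (text : String) (names : List (String × List String)) : List (String × Int) :=
  let d := PySem.Dict.ofList names
  let t := text.toList
  let lengths : PySem.Set Int :=
    PySem.Set.ofList (d.values.flatMap (fun lst => lst.map (fun n => PySem.Str.len n)))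
  let grams : PySem.Set (List Char) :=
    PySem.Set.ofList (lengths.flatMap (fun l =>
      (PySem.List.pyRange 0 ((t.length : Int) + 1) 1).map (fun i =>
        PySem.List.slice t (some i) (some (i + l)))))
  d.items.map (fun p =>
    (p.1, (p.2.map (fun n => if PySem.Set.contains grams n.toList then (1 : Int) else 0)).sum))

-- ===== PRECONDITION & SPEC =====
def Spec_count_occurances (text : String) (names : List (String × List String)) (out : List (String × Int)) : Prop := out = count_occurances_alt text names
instance (text : String) (names : List (String × List String)) (out : List (String × Int)) : Decidable (Spec_count_occurances text names out) := by unfold Spec_count_occurances; infer_instance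

-- ===== CLAIM (what is proved, stated in full; the proofs are below) =====
def Claim_equal_count_occurances : Prop := ∀ (text : String) (names : List (String × List String)), Dom_count_occurances text names → Spec_count_occurances text names (count_occurances text names)

-- ===== LEMMAS AND PROOFS =====

-- A's inner loop over a label's name list just adds the presence indicators onto counts[label].
theorem inner_loop_eq (text label : String) (lst : List String)
    (counts : PySem.Dict String Int) (v : Int) :
    lst.foldl (fun counts name =>
        counts.insert label (counts.getD label 0 + (if PySem.Str.isIn name text then (1 : Int) else 0)))
      (counts.insert label v)
    = counts.insert label
        (v + (lst.map (fun n => if PySem.Str.isIn n text then (1 : Int) else 0)).sum) := by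
  induction lst generalizing counts v with
  | nil => simp
  | cons n rest ih =>
    simp only [List.foldl_cons, PySem.Dict.insert_insert_self, PySem.Dict.getD_insert_self,
      List.map_cons, List.sum_cons]
    rw [ih]
    ring_nf

-- membership in B's substring index is exactly substring occurrence, for any string whose
-- length is one of the collected lengths
theorem grams_contains (s : String) (lengths : List Int)
    (hnn : ∀ l ∈ lengths, ∃ m : Nat, l = (m : Int)) (n : String)
    (hlen : ((n.toList.length : Nat) : Int) ∈ lengths) :
    PySem.Set.contains
      (PySem.Set.ofList (lengths.flatMap (fun l =>
        (PySem.List.pyRange 0 ((s.toList.length : Int) + 1) 1).map (fun i =>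
          PySem.List.slice s.toList (some i) (some (i + l)))))) n.toList
    = PySem.Str.isIn n s := by
  cases h : PySem.Str.isIn n s with
  | true =>
    rcases (PySem.Str.isIn_iff_infix n s).1 h with ⟨s₁, s₂, hcat⟩
    have hle : s₁.length ≤ s.toList.length := by
      rw [← hcat]; simp
    refine (PySem.Set.contains_iff _ _).2 ?_
    refine (PySem.Set.mem_ofList _ _).2 ?_
    refine List.mem_flatMap.2 ⟨((n.toList.length : Nat) : Int), hlen, ?_⟩
    refine List.mem_map.2 ⟨((s₁.length : Nat) : Int), ?_, ?_⟩
    · exact PySem.List.mem_pyRange_one.2 ⟨by positivity, by exact_mod_cast Nat.lt_succ_of_le hle⟩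
    · rw [PySem.List.slice_natCast_add]
      have hdrop : s.toList.drop s₁.length = n.toList ++ s₂ := by
        rw [← hcat, List.append_assoc, List.drop_left]
      rw [hdrop, List.take_left]
  | false =>
    have hninf : ¬ n.toList <:+: s.toList := by
      intro hc
      have := (PySem.Str.isIn_iff_infix n s).2 hc
      rw [h] at this
      exact Bool.noConfusion this
    have hnm : n.toList ∉ (lengths.flatMap (fun l =>
        (PySem.List.pyRange 0 ((s.toList.length : Int) + 1) 1).map (fun i =>
          PySem.List.slice s.toList (some i) (some (i + l))))) := by
      intro hmem
      rcases List.mem_flatMap.1 hmem with ⟨l, hl, hmap⟩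
      rcases List.mem_map.1 hmap with ⟨i, hi, hslice⟩
      rcases hnn l hl with ⟨m, rfl⟩
      have hi0 : (0 : Int) ≤ i := (PySem.List.mem_pyRange_one.1 hi).1
      have hil : (0 : Int) ≤ i + (m : Int) := by positivity
      rw [PySem.List.slice_toNat] at hslice
      apply hninf
      rw [← hslice]
      exact ((List.take_prefix _ _).isInfix).trans (List.drop_suffix _ _).isInfix
      exact hi0
      exact hil
    simp only [Bool.eq_false_iff, Ne, PySem.Set.contains_iff, PySem.Set.mem_ofList]
    exact hnm
theorem count_occurances_eq (text : String) (names : List (String × List String)) :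
    count_occurances text names = count_occurances_alt text names := by
  unfold count_occurances count_occurances_alt
  set d := PySem.Dict.ofList names with hd
  have hnd : d.keys.Nodup := PySem.Dict.nodup_keys_ofList names
  have hstep : (fun (counts : PySem.Dict String Int) label =>
      (d.getD label []).foldl (fun counts name =>
          counts.insert label (counts.getD label 0 + (if PySem.Str.isIn name text then (1 : Int) else 0)))
        (counts.insert label 0))
      = (fun counts label => counts.insert label
          ((d.getD label []).map (fun n => if PySem.Str.isIn n text then (1 : Int) else 0)).sum) := by
    funext counts label
    rw [inner_loop_eq]
    ring_nf
  simp only []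
  rw [hstep]
  have hitems := PySem.Dict.items_foldl_insert_fresh (k := id)
        (v := fun label => ((d.getD label []).map (fun n => if PySem.Str.isIn n text then (1 : Int) else 0)).sum)
        (l := d.keys) (d := PySem.Dict.empty)
        (by intro a _; exact PySem.Dict.contains_empty a)
        (by simpa using hnd)
  simp only [id_eq] at hitems
  rw [hitems]
  show (PySem.Dict.empty.items ++ _) = _
  simp only [PySem.Dict.empty, List.nil_append]
  have hkeys : d.keys = d.items.map Prod.fst := rfl
  rw [hkeys, List.map_map]
  apply List.map_congr_left
  intro p hp
  have hgd : d.getD p.1 [] = p.2 := by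
    exact PySem.Dict.getD_of_mem_items d (by simpa using hp) hnd []
  simp only [Function.comp, hgd]
  refine congrArg (fun z => (p.1, z)) ?_
  apply congrArg List.sum
  apply List.map_congr_left
  intro n hn
  have hvals : p.2 ∈ d.values := List.mem_map.2 ⟨p, hp, rfl⟩
  have hlen : ((n.toList.length : Nat) : Int)
      ∈ PySem.Set.ofList (d.values.flatMap (fun lst => lst.map (fun x => PySem.Str.len x))) := by
    refine (PySem.Set.mem_ofList _ _).2 ?_
    refine List.mem_flatMap.2 ⟨p.2, hvals, List.mem_map.2 ⟨n, hn, ?_⟩⟩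
    rw [PySem.Str.len_eq]
  have hnn : ∀ l ∈ PySem.Set.ofList (d.values.flatMap (fun lst => lst.map (fun x => PySem.Str.len x))),
      ∃ m : Nat, l = (m : Int) := by
    intro l hl
    rcases List.mem_flatMap.1 ((PySem.Set.mem_ofList _ _).1 hl) with ⟨lst, -, hmap⟩
    rcases List.mem_map.1 hmap with ⟨x, -, rfl⟩
    exact ⟨x.toList.length, by rw [PySem.Str.len_eq]⟩
  rw [grams_contains text _ hnn n hlen]

-- ===== VERDICT (by name: the statement is the Claim_ definition above) =====
theorem count_occurances_spec : Claim_equal_count_occurances := by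
  intro text names _
  exact count_occurances_eq text names
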